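-- pv_equiv track=rewrite | github.com/nyaoouo/NyLib2 | nylib/utils/__init__.py | seq_dif
-- ===== SOURCE A (Python) =====
-- def seq_dif(seq):
--     if len(seq) < 2:
--         raise ValueError()
--     _n = next(it := iter(seq))
--     dif = (n := next(it)) - _n
--     while 1:
--         try:
--             if (_n := next(it)) - n != dif:
--                 raise ValueError()
--         except StopIteration:
--             return dif
--         n = _n
-- ===== SOURCE B (Python) =====
-- def seq_dif(seq):
--     if len(seq) < 2:
--         raise ValueError()
--     lst = list(seq)
--     first = lst[0]
--     dif = lst[1] - first
--     for i, v in enumerate(lst):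
--         if v != first + i * dif:
--             raise ValueError()
--     return dif
-- ===== Notes on version B (the rewrite author's own statement) =====
-- stated objective: alternative
-- what changed: Replaces A's running-iterator comparison of consecutive differences by verifying the closed form of an arithmetic progression, lst[i] == lst[0] + i*dif, over enumerate(lst); no adjacent pair is ever subtracted in the check.
import Mathlib
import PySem

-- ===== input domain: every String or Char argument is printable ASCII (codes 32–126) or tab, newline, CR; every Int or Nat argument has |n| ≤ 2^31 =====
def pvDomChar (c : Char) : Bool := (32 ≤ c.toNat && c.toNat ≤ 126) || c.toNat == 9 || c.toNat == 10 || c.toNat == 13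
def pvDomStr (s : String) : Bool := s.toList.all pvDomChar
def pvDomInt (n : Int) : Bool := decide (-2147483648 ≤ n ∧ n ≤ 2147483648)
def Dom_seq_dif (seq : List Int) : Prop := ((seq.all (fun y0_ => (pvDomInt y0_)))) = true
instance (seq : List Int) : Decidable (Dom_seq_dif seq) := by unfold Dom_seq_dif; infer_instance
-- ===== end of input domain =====

-- B verifies the arithmetic-progression closed form lst[i] = lst[0] + i*dif over enumerate,
-- instead of A's running-iterator comparison of consecutive differences; objective: alternative.
-- Equivalence is for the RETURN value on inputs where A returns (Pre_); both raise ValueError elsewhere.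

-- ===== PORT A =====
-- A's while-loop: n is the previous element, walk the iterator; on StopIteration return dif.
-- The `raise ValueError()` branches (excluded by Pre_) are rendered as returning 0.
def seqDifLoopA (dif : Int) : Int → List Int → Int
  | _, [] => dif
  | n, x :: xs => if x - n ≠ dif then 0 else seqDifLoopA dif x xs

def seq_dif (seq : List Int) : Int :=
  match seq with
  | a :: b :: rest =>
    let dif := b - a
    seqDifLoopA dif b rest
  | _ => 0

-- ===== PORT B =====
-- B: first = lst[0]; dif = lst[1] - first; check v == first + i*dif over enumerate(lst).
def seq_dif_alt (seq : List Int) : Int :=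
  if seq.length < 2 then 0
  else
    let first := seq[0]!
    let dif := seq[1]! - first
    if (PySem.List.enumerate seq).all (fun p => p.2 == first + p.1 * dif) then dif else 0

-- ===== PRECONDITION & SPEC =====
-- Pre_: exactly the inputs on which Python A returns (length ≥ 2 and constant consecutive
-- difference); on the rest A raises ValueError.
def Pre_seq_dif (seq : List Int) : Prop :=
  2 ≤ seq.length ∧ List.IsChain (fun x y => y - x = seq[1]! - seq[0]!) seq
instance (seq : List Int) : Decidable (Pre_seq_dif seq) := by unfold Pre_seq_dif; infer_instance
def pvWitness_seq_dif : List Int := [1, 3, 5]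

def Spec_seq_dif (seq : List Int) (out : Int) : Prop := out = seq_dif_alt seq
instance (seq : List Int) (out : Int) : Decidable (Spec_seq_dif seq out) := by unfold Spec_seq_dif; infer_instance

-- ===== CLAIM (what is proved, stated in full; the proofs are below) =====
def Claim_equal_seq_dif : Prop := ∀ (seq : List Int), Dom_seq_dif seq → Pre_seq_dif seq → Spec_seq_dif seq (seq_dif seq)

-- ===== LEMMAS AND PROOFS =====

-- A's loop returns dif when every consecutive difference along n :: l equals dif.
theorem seqDifLoopA_of_chain (dif : Int) (n : Int) (l : List Int)
    (h : List.IsChain (fun x y => y - x = dif) (n :: l)) : seqDifLoopA dif n l = dif := by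
  induction l generalizing n with
  | nil => rfl
  | cons x xs ih =>
    rcases List.isChain_cons.mp h with ⟨hx, hrest⟩
    simp [seqDifLoopA, hx]
    exact ih x hrest

-- A chain of constant difference dif starting at a satisfies the closed form a + i*dif.
theorem enumerate_all_of_chain (dif first : Int) (l : List Int) (s : Int) (a : Int)
    (ha : a = first + s * dif)
    (h : List.IsChain (fun x y => y - x = dif) (a :: l)) :
    ((PySem.List.enumerate (a :: l) s).all (fun p => p.2 == first + p.1 * dif)) = true := by
  induction l generalizing a s with
  | nil => simp [PySem.List.enumerate_cons, ha]
  | cons b t ih =>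
    rcases List.isChain_cons.mp h with ⟨hab, hrest⟩
    have hab' : b - a = dif := by simpa using hab
    have hb : b = first + (s + 1) * dif := by rw [ha] at hab'; linarith
    have := ih (s + 1) b hb hrest
    simp [PySem.List.enumerate_cons, ha] at this ⊢
    exact this

-- ===== VERDICT (by name: the statement is the Claim_ definition above) =====
theorem seq_dif_spec : Claim_equal_seq_dif := by
  intro seq _ hpre
  rcases hpre with ⟨hlen, hchain⟩
  unfold Spec_seq_dif
  match seq, hlen, hchain with
  | a :: b :: rest, _, hchain =>
    have hd : (a :: b :: rest)[1]! - (a :: b :: rest)[0]! = b - a := by simp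
    rw [hd] at hchain
    have hA : seq_dif (a :: b :: rest) = b - a := by
      unfold seq_dif
      exact seqDifLoopA_of_chain (b - a) b rest (List.isChain_cons.mp hchain).2
    have hz := enumerate_all_of_chain (b - a) a (b :: rest) 0 a (by ring) hchain
    unfold seq_dif_alt
    simp only [List.length_cons]
    rw [if_neg (by omega)]
    simp only [List.getElem!_cons_zero, List.getElem!_cons_succ]
    rw [if_pos hz]
    exact hA
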